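-- pv_equiv track=rewrite | github.com/vitaldb/openecg | scripts/viz_v4_predictions.py | frames_to_bands
-- ===== SOURCE A (Python) =====
-- FRAME_MS = 20
--
-- FS = 250
--
-- CMAP = {1: ("red", "P"), 2: ("blue", "QRS"), 3: ("green", "T")}
--
-- def frames_to_bands(frames, n_samples):
--     """Convert per-frame labels to (start_sample, end_sample, class) bands."""
--     spf = int(round(FRAME_MS * FS / 1000.0))  # 5
--     out = []
--     cur = int(frames[0])
--     start = 0
--     for i, c in enumerate(frames):
--         c = int(c)
--         if c != cur:
--             if cur in CMAP:
--                 out.append((start * spf, i * spf, cur))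
--             cur = c
--             start = i
--     if cur in CMAP:
--         out.append((start * spf, len(frames) * spf, cur))
--     return [(s, min(e, n_samples), c) for s, e, c in out]
-- ===== SOURCE B (Python) =====
-- CMAP = {1: ("red", "P"), 2: ("blue", "QRS"), 3: ("green", "T")}
--
--
-- def frames_to_bands(frames, n_samples):
--     """Convert per-frame labels to (start_sample, end_sample, class) bands."""
--     spf = int(round(20 * 250 / 1000.0))  # 5
--     ints = [int(c) for c in frames]
--     n = len(ints)
--     bounds = [0] + [i for i in range(1, n) if ints[i] != ints[i - 1]] + [n]
--     out = []
--     for s, e in zip(bounds, bounds[1:]):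
--         cls = ints[s]
--         if cls in CMAP:
--             out.append((s * spf, min(e * spf, n_samples), cls))
--     return out
-- ===== Notes on version B (the rewrite author's own statement) =====
-- stated objective: alternative
-- what changed: Replaces A's single stateful scan (tracking cur/start and emitting on change) with a two-phase breakpoint-table algorithm: first compute the list of boundary indices where the label changes, then emit one band per consecutive boundary pair, reading the class at the segment start and capping at n_samples inline.
-- outside the precondition, e.g. on frames_to_bands([], 10): A raises IndexError, B raises IndexError
import Mathlib
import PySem

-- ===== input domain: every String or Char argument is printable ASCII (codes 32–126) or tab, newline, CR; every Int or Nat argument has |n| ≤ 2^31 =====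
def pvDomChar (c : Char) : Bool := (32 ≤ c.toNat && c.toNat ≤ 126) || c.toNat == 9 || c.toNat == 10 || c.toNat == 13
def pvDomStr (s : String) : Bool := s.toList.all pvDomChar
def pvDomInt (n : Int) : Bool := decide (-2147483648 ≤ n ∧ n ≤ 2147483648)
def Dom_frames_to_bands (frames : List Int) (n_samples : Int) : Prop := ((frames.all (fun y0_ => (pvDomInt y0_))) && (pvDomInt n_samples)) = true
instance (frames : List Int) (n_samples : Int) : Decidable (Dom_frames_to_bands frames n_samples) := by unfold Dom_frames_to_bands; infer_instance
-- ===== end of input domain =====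

-- B replaces A's single stateful change-detecting scan by a boundary-index table followed by
-- a pass over consecutive boundary pairs (objective: alternative decomposition, same cost).

-- module constant CMAP (both Pythons use it; only key membership matters here)
def CMAP : PySem.Dict Int (String × String) :=
  PySem.Dict.ofList [(1, ("red", "P")), (2, ("blue", "QRS")), (3, ("green", "T"))]

-- ===== PORT A =====
-- loop body of A's 'for i, c in enumerate(frames)' (state: (out, cur, start))
def aStep (st : List (Int × Int × Int) × Int × Int) (p : Int × Int) :
    List (Int × Int × Int) × Int × Int :=
  if p.2 ≠ st.2.1 then
    ((if CMAP.contains st.2.1 then st.1 ++ [(st.2.2 * 5, p.1 * 5, st.2.1)] else st.1), p.2, p.1)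
  else st

def frames_to_bands (frames : List Int) (n_samples : Int) : List (Int × Int × Int) :=
  -- spf = int(round(20 * 250 / 1000.0)) = 5 (constant float expression, exact)
  match frames with
  | [] => []  -- Python raises IndexError on frames[0]; excluded by Pre_
  | f0 :: _ =>
    let st := (PySem.List.enumerate frames 0).foldl aStep ([], f0, 0)
    let out := if CMAP.contains st.2.1 then
                 st.1 ++ [(st.2.2 * 5, (frames.length : Int) * 5, st.2.1)]
               else st.1
    out.map (fun t => (t.1, min t.2.1 n_samples, t.2.2))

-- ===== PORT B =====
def frames_to_bands_alt (frames : List Int) (n_samples : Int) : List (Int × Int × Int) :=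
  -- spf = 5 as in A; int(c) = c on Int, so ints = frames
  let n : Int := frames.length
  let bounds : List Int :=
    [0] ++ (PySem.List.pyRange 1 n 1).filter
             (fun i => PySem.List.pyGetD frames i 0 ≠ PySem.List.pyGetD frames (i - 1) 0)
        ++ [n]
  (bounds.zip (bounds.drop 1)).foldl
    (fun out p =>
      let cls := PySem.List.pyGetD frames p.1 0
      if CMAP.contains cls then out ++ [(p.1 * 5, min (p.2 * 5) n_samples, cls)] else out)
    []

-- ===== PRECONDITION & SPEC =====
-- Pre_ excludes only the empty list, on which A raises IndexError (frames[0]).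
def Pre_frames_to_bands (frames : List Int) (_n_samples : Int) : Prop := frames ≠ []
instance (frames : List Int) (n_samples : Int) : Decidable (Pre_frames_to_bands frames n_samples) := by unfold Pre_frames_to_bands; infer_instance

def pvWitness_frames_to_bands : List Int × Int := ([1, 1, 2, 0, 3], 20)

def Spec_frames_to_bands (frames : List Int) (n_samples : Int) (out : List (Int × Int × Int)) : Prop := out = frames_to_bands_alt frames n_samples
instance (frames : List Int) (n_samples : Int) (out : List (Int × Int × Int)) : Decidable (Spec_frames_to_bands frames n_samples out) := by unfold Spec_frames_to_bands; infer_instance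

-- ===== CLAIM (what is proved, stated in full; the proofs are below) =====
def Claim_equal_frames_to_bands : Prop := ∀ (frames : List Int) (n_samples : Int), Dom_frames_to_bands frames n_samples → Pre_frames_to_bands frames n_samples → Spec_frames_to_bands frames n_samples (frames_to_bands frames n_samples)

-- ===== LEMMAS AND PROOFS =====

-- common skeleton: the runs of the list, scanned with current value `cur`, run start `s`,
-- next index `i`; each closed run (and the final one) is emitted if its value is in CMAP.
def gA (cur s i : Int) : List Int → List (Int × Int × Int)
  | [] => if CMAP.contains cur then [(s * 5, i * 5, cur)] else []
  | c :: cs =>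
    if c ≠ cur then
      (if CMAP.contains cur then [(s * 5, i * 5, cur)] else []) ++ gA c i (i + 1) cs
    else gA cur s (i + 1) cs

-- boundary indices of the suffix, previous value `prev`, next index `i`
def bnds (prev i : Int) : List Int → List Int
  | [] => []
  | c :: cs => if c ≠ prev then i :: bnds c (i + 1) cs else bnds prev (i + 1) cs

def cap (ns : Int) (t : Int × Int × Int) : Int × Int × Int := (t.1, min t.2.1 ns, t.2.2)

-- B's pair loop, recursively over the tail of the boundary list
def segs (frames : List Int) (ns s : Int) : List Int → List (Int × Int × Int)
  | [] => []
  | e :: rest =>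
    (if CMAP.contains (PySem.List.pyGetD frames s 0) then
       [(s * 5, min (e * 5) ns, PySem.List.pyGetD frames s 0)]
     else []) ++ segs frames ns e rest

-- A-side: the enumerate fold plus the final close is `gA`
lemma foldA (l : List Int) : ∀ (out : List (Int × Int × Int)) (cur s i : Int),
    (let st := (PySem.List.enumerate l i).foldl aStep (out, cur, s)
     if CMAP.contains st.2.1 then st.1 ++ [(st.2.2 * 5, (i + l.length) * 5, st.2.1)] else st.1)
    = out ++ gA cur s i l := by
  induction l with
  | nil =>
    intro out cur s i
    simp only [PySem.List.enumerate_nil, List.foldl_nil, gA, List.length_nil]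
    split <;> simp
  | cons c cs ih =>
    intro out cur s i
    have hl : (i + ((c :: cs).length : Int)) = (i + 1) + (cs.length : Int) := by
      push_cast [List.length_cons]; ring
    simp only [PySem.List.enumerate_cons, List.foldl_cons, hl]
    by_cases hc : c ≠ cur
    · have hstep : aStep (out, cur, s) (i, c) =
          ((if CMAP.contains cur then out ++ [(s * 5, i * 5, cur)] else out), c, i) := by
        simp [aStep, hc]
      rw [hstep]
      rw [ih (if CMAP.contains cur then out ++ [(s * 5, i * 5, cur)] else out) c i (i + 1)]
      simp only [gA, if_pos hc]
      split <;> simp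
    · have hstep : aStep (out, cur, s) (i, c) = (out, cur, s) := by
        simp [aStep, hc]
      rw [hstep, ih out cur s (i + 1)]
      simp only [gA, if_neg hc]

-- B's zip-pair fold is `segs`
lemma foldB (frames : List Int) (ns : Int) : ∀ (rest : List Int) (b0 : Int) (acc : List (Int × Int × Int)),
    ((b0 :: rest).zip rest).foldl
      (fun out p =>
        if CMAP.contains (PySem.List.pyGetD frames p.1 0) then
          out ++ [(p.1 * 5, min (p.2 * 5) ns, PySem.List.pyGetD frames p.1 0)]
        else out) acc
    = acc ++ segs frames ns b0 rest := by
  intro rest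
  induction rest with
  | nil => intro b0 acc; simp [segs]
  | cons e t ih =>
    intro b0 acc
    simp only [List.zip_cons_cons, List.foldl_cons]
    rw [ih e]
    simp only [segs]
    split <;> simp [List.append_assoc]

-- the filter over the index range computes the boundary list
lemma filt (frames : List Int) : ∀ (l : List Int) (prev : Int) (i : Nat),
    0 < i → frames.drop i = l → i ≤ frames.length →
    frames[i - 1]? = some prev →
    (PySem.List.pyRange (i : Int) (frames.length : Int) 1).filter
      (fun j => PySem.List.pyGetD frames j 0 ≠ PySem.List.pyGetD frames (j - 1) 0)
    = bnds prev (i : Int) l := by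
  intro l
  induction l with
  | nil =>
    intro prev i hi hdrop hle hprev
    have hlen : frames.length = i := by
      have := congrArg List.length hdrop; simp at this; omega
    rw [hlen]
    rw [PySem.List.pyRange_one_eq_nil (le_refl _)]
    simp [bnds]
  | cons c cs ih =>
    intro prev i hi hdrop hle hprev
    have hilt : i < frames.length := by
      have := congrArg List.length hdrop; simp at this; omega
    have hgetc : frames[i]? = some c := by
      have : (frames.drop i)[0]? = some c := by rw [hdrop]; rfl
      simpa [List.getElem?_drop] using this
    rw [PySem.List.pyRange_one_cons (by exact_mod_cast hilt)]
    have hdrop' : frames.drop (i + 1) = cs := by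
      have : (frames.drop i).drop 1 = cs := by rw [hdrop]; rfl
      simpa [List.drop_drop, Nat.add_comm] using this
    have hrec := ih c (i + 1) (by omega) hdrop' (by omega) (by simpa using hgetc)
    have hgi : PySem.List.pyGetD frames (i : Int) 0 = c := by
      rw [PySem.List.pyGetD_natCast]; simp [List.getD_eq_getElem?_getD, hgetc]
    have hgi1 : PySem.List.pyGetD frames ((i : Int) - 1) 0 = prev := by
      have : ((i : Int) - 1) = ((i - 1 : Nat) : Int) := by omega
      rw [this, PySem.List.pyGetD_natCast]
      simp [List.getD_eq_getElem?_getD, hprev]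
    simp only [List.filter_cons, bnds, hgi, hgi1]
    push_cast at hrec
    by_cases hc : c ≠ prev
    · rw [hrec]; simp [hc]
    · rw [hrec]; simp at hc; simp [hc]

-- key: B's segment pass over the boundary table equals A's runs, capped
lemma key (frames : List Int) (ns : Int) : ∀ (l : List Int) (prev : Int) (s : Int) (i : Nat),
    0 ≤ s → s < (i : Int) → frames.drop i = l → i ≤ frames.length →
    PySem.List.pyGetD frames s 0 = prev →
    segs frames ns s (bnds prev (i : Int) l ++ [(frames.length : Int)])
    = (gA prev s (i : Int) l).map (cap ns) := by
  intro l
  induction l with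
  | nil =>
    intro prev s i hs hsi hdrop hle hval
    have hlen : frames.length = i := by
      have := congrArg List.length hdrop; simp at this; omega
    simp only [bnds, List.nil_append, segs, hval, gA, hlen]
    split <;> simp [cap]
  | cons c cs ih =>
    intro prev s i hs hsi hdrop hle hval
    have hilt : i < frames.length := by
      have := congrArg List.length hdrop; simp at this; omega
    have hgetc : frames[i]? = some c := by
      have : (frames.drop i)[0]? = some c := by rw [hdrop]; rfl
      simpa [List.getElem?_drop] using this
    have hdrop' : frames.drop (i + 1) = cs := by
      have : (frames.drop i).drop 1 = cs := by rw [hdrop]; rfl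
      simpa [List.drop_drop, Nat.add_comm] using this
    have hgi : PySem.List.pyGetD frames (i : Int) 0 = c := by
      rw [PySem.List.pyGetD_natCast]; simp [List.getD_eq_getElem?_getD, hgetc]
    by_cases hc : c ≠ prev
    · have hrec := ih c (i : Int) (i + 1) (by omega) (by push_cast; omega) hdrop' (by omega) hgi
      push_cast at hrec
      simp only [bnds, List.cons_append, segs, hval, gA, if_pos hc, hrec]
      split <;> simp [cap]
    · have hrec := ih prev s (i + 1) hs (by push_cast; omega) hdrop' (by omega) hval
      push_cast at hrec
      simp only [bnds, gA, if_neg hc]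
      exact hrec

-- ===== VERDICT (by name: the statement is the Claim_ definition above) =====
theorem frames_to_bands_spec : Claim_equal_frames_to_bands := by
  intro frames ns _ hpre
  unfold Spec_frames_to_bands
  match frames, hpre with
  | f0 :: l, _ =>
    unfold frames_to_bands frames_to_bands_alt
    simp only []
    have hA := foldA (f0 :: l) [] f0 0 0
    simp only [zero_add] at hA
    rw [hA]
    simp only [List.nil_append, List.cons_append, List.drop_succ_cons, List.drop_zero]
    have hB := foldB (f0 :: l) ns
      ((PySem.List.pyRange 1 ((f0 :: l).length : Int) 1).filter
        (fun j => PySem.List.pyGetD (f0 :: l) j 0 ≠ PySem.List.pyGetD (f0 :: l) (j - 1) 0) ++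
        [((f0 :: l).length : Int)]) 0 []
    rw [hB]
    have hval0 : PySem.List.pyGetD (f0 :: l) 0 0 = f0 := by
      simp
    have hfilt := filt (f0 :: l) l f0 1 (by omega) rfl (by simp) (by simp)
    have hkey := key (f0 :: l) ns l f0 0 1 (by omega) (by omega) rfl (by simp) hval0
    push_cast at hfilt hkey
    rw [hfilt, hkey]
    simp only [gA, if_neg (by simp : ¬ (f0 ≠ f0)), zero_add]
    simp [cap]
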